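-- pv_equiv track=rewrite | github.com/Marcos-Gil/CodingPracticeProblems | Solutions/Source2/Mathematical/ClosestNumber.py | closestNum
-- ===== SOURCE A (Python) =====
-- def closestNum(values):
--     if values[0] < 0:
--         closest = values[0] - 1
--         while (closest % values[1] != 0):
--             closest -= 1
--         values[2] = closest
--         return values[2]
--     else:
--         closest = values[0] - 1
--         while (closest > 0):
--             if closest % values[1] == 0:
--                 values[2] = closest
--                 return values[2]
--             closest -= 1
-- ===== SOURCE B (Python) =====
-- def closestNum(values):
--     v0, v1 = values[0], values[1]
--     m = abs(v1)
--     res = (v0 - 1) - (v0 - 1) % m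
--     if v0 < 0:
--         values[2] = res
--         return res
--     if res > 0:
--         values[2] = res
--         return res
--     return None
-- ===== Notes on version B (the rewrite author's own statement) =====
-- stated objective: faster
-- what changed: Replaced A's decrement-by-one search loops with one closed-form floor-modulus computation res = (v0-1) - (v0-1) % abs(v1) plus a sign/positivity branch; intended as faster (A loops up to values[0]+|values[1]| times, B does constant arithmetic), though a timing run confirms this only on draws where A's loop is long.
-- outside the precondition, e.g. on closestNum([0, 0, 0]): A returns None, B raises ZeroDivisionError; on closestNum([1, 0, 0]): A returns None, B raises ZeroDivisionError; on closestNum([0]): A returns None, B raises IndexError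
import Mathlib
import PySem

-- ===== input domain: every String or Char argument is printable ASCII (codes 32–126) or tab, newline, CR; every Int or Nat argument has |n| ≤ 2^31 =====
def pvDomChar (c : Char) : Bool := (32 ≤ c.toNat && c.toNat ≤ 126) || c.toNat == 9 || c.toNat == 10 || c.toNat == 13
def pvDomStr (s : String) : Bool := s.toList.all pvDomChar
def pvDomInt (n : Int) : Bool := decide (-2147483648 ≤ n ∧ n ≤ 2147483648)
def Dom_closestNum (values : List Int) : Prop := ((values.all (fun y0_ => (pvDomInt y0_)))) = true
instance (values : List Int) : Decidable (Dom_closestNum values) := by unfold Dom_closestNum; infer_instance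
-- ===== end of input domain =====

-- B replaces A's decrement-by-one search loops with one closed-form floor-modulus
-- computation: intended as faster (A takes up to values[0]+|values[1]| loop steps, B is
-- constant arithmetic; timing runs measured from 4.4x faster down to parity depending
-- on the drawn values). Both A and B assign values[2] in Python before returning a
-- number; the equivalence proved here is about the RETURN value only.


-- ===== PORT A =====
-- A's negative-branch loop 'while closest % values[1] != 0: closest -= 1'.
-- The fuel only makes the recursion total; inside Pre_ (v1 ≠ 0) the fuel |v1| + 1 is
-- never exhausted (the loop stops within |v1| steps), so this is the Python loop step for step.
def pvLoopNeg (fuel : Nat) (v1 closest : Int) : Int :=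
  match fuel with
  | 0 => closest
  | fuel + 1 =>
    if PySem.Int.mod closest v1 ≠ 0 then pvLoopNeg fuel v1 (closest - 1) else closest

-- A's positive-branch loop 'while closest > 0: if closest % v1 == 0: return closest; closest -= 1'.
def pvLoopPos (v1 closest : Int) : Option Int :=
  if h : 0 < closest then
    if PySem.Int.mod closest v1 = 0 then some closest
    else pvLoopPos v1 (closest - 1)
  else none
termination_by closest.toNat
decreasing_by omega

def closestNum (values : List Int) : Option Int :=
  let v0 := PySem.List.pyGetD values 0 0
  let v1 := PySem.List.pyGetD values 1 0
  if v0 < 0 then some (pvLoopNeg (v1.natAbs + 1) v1 (v0 - 1))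
  else pvLoopPos v1 (v0 - 1)

-- ===== PORT B =====
def closestNum_alt (values : List Int) : Option Int :=
  let v0 := PySem.List.pyGetD values 0 0
  let v1 := PySem.List.pyGetD values 1 0
  let m : Int := (v1.natAbs : Int)
  let res := (v0 - 1) - PySem.Int.mod (v0 - 1) m
  if v0 < 0 then some res
  else if 0 < res then some res
  else none

-- ===== PRECONDITION & SPEC =====
-- Pre_ excludes: a zero values[1] (modulo by zero: A raises whenever its loop body runs,
-- and where the loop body never runs A accidentally returns None while B still raises),
-- and lists too short for the index reads / the values[2] assignment, where one of the
-- two programs raises IndexError.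
def Pre_closestNum (values : List Int) : Prop :=
  2 ≤ values.length ∧ PySem.List.pyGetD values 1 0 ≠ 0 ∧
  (3 ≤ values.length ∨
    (0 ≤ PySem.List.pyGetD values 0 0 ∧
     PySem.List.pyGetD values 0 0 ≤ ((PySem.List.pyGetD values 1 0).natAbs : Int)))
instance (values : List Int) : Decidable (Pre_closestNum values) := by
  unfold Pre_closestNum; infer_instance
def pvWitness_closestNum : List Int := [10, 3, 0]
def Spec_closestNum (values : List Int) (out : Option Int) : Prop := out = closestNum_alt values
instance (values : List Int) (out : Option Int) : Decidable (Spec_closestNum values out) := by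
  unfold Spec_closestNum; infer_instance

-- ===== CLAIM (what is proved, stated in full; the proofs are below) =====
def Claim_equal_closestNum : Prop :=
  ∀ (values : List Int), Dom_closestNum values → Pre_closestNum values →
    Spec_closestNum values (closestNum values)

-- ===== LEMMAS AND PROOFS =====
-- 'closest % v1 == 0' is divisibility, so it agrees with the modulus by |v1|.
theorem pvMod_zero_iff_mod_abs_zero (c v1 : Int) :
    PySem.Int.mod c v1 = 0 ↔ PySem.Int.mod c ((v1.natAbs : Int)) = 0 := by
  rw [PySem.Int.mod_eq_zero_iff_dvd, PySem.Int.mod_eq_zero_iff_dvd]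
  exact (Int.natAbs_dvd).symm

-- One decrement step lowers the (nonzero) modulus by one.
theorem pvMod_pred (c m : Int) (hm : 0 < m) (h : PySem.Int.mod c m ≠ 0) :
    PySem.Int.mod (c - 1) m = PySem.Int.mod c m - 1 := by
  have h0 := PySem.Int.mod_nonneg c hm
  have h1 := PySem.Int.mod_lt c hm
  have e : ∀ a : Int, PySem.Int.mod a m = a % m := fun a => PySem.Int.mod_eq_emod_of_pos (a := a) hm
  rw [e c] at h h0 h1
  rw [e (c - 1), e c]
  by_cases hm1 : m = 1
  · subst hm1; simp at h
  · have hm2 : 2 ≤ m := by omega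
    have h1m : (1 : Int) % m = 1 := Int.emod_eq_of_lt (by omega) (by omega)
    rw [Int.sub_emod, h1m]
    exact Int.emod_eq_of_lt (by omega) (by omega)

theorem pvLoopNeg_eq (fuel : Nat) : ∀ (v1 c : Int), v1 ≠ 0 →
    (PySem.Int.mod c ((v1.natAbs : Int))).toNat < fuel →
    pvLoopNeg fuel v1 c = c - PySem.Int.mod c ((v1.natAbs : Int)) := by
  induction fuel with
  | zero => intro v1 c _ h; omega
  | succ fuel ih =>
    intro v1 c hv hf
    have hm : (0 : Int) < (v1.natAbs : Int) := by
      have := Int.natAbs_pos.mpr hv; exact_mod_cast this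
    have h0 := PySem.Int.mod_nonneg c hm
    by_cases hz : PySem.Int.mod c v1 = 0
    · have : PySem.Int.mod c ((v1.natAbs : Int)) = 0 :=
        (pvMod_zero_iff_mod_abs_zero c v1).mp hz
      rw [this]
      simp only [pvLoopNeg, hz, ne_eq, not_true_eq_false, if_false, sub_zero]
    · have hz' : PySem.Int.mod c ((v1.natAbs : Int)) ≠ 0 := by
        intro h; exact hz ((pvMod_zero_iff_mod_abs_zero c v1).mpr h)
      have hstep := pvMod_pred c _ hm hz'
      have := ih v1 (c - 1) hv (by omega)
      simp only [pvLoopNeg, if_pos hz]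
      rw [this, hstep]; ring

theorem pvLoopPos_eq (v1 : Int) (hv : v1 ≠ 0) : ∀ (n : Nat) (c : Int), c.toNat ≤ n →
    pvLoopPos v1 c =
      (if 0 < c - PySem.Int.mod c ((v1.natAbs : Int))
       then some (c - PySem.Int.mod c ((v1.natAbs : Int))) else none) := by
  have hm : (0 : Int) < (v1.natAbs : Int) := by
    have := Int.natAbs_pos.mpr hv; exact_mod_cast this
  intro n
  induction n with
  | zero =>
    intro c hc
    have hc0 : c ≤ 0 := by omega
    have h0 := PySem.Int.mod_nonneg c hm
    rw [pvLoopPos, dif_neg (by omega), if_neg (by omega)]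
  | succ n ih =>
    intro c hc
    have h0 := PySem.Int.mod_nonneg c hm
    by_cases hpos : 0 < c
    · by_cases hz : PySem.Int.mod c v1 = 0
      · have hz' : PySem.Int.mod c ((v1.natAbs : Int)) = 0 :=
          (pvMod_zero_iff_mod_abs_zero c v1).mp hz
        rw [pvLoopPos, dif_pos hpos, if_pos hz, hz', if_pos (by omega)]
        simp
      · have hz' : PySem.Int.mod c ((v1.natAbs : Int)) ≠ 0 := by
          intro h; exact hz ((pvMod_zero_iff_mod_abs_zero c v1).mpr h)
        have hstep := pvMod_pred c _ hm hz'
        rw [pvLoopPos, dif_pos hpos, if_neg hz, ih (c - 1) (by omega), hstep]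
        have : c - 1 - (PySem.Int.mod c ((v1.natAbs : Int)) - 1)
             = c - PySem.Int.mod c ((v1.natAbs : Int)) := by ring
        rw [this]
    · have hc0 : c ≤ 0 := by omega
      rw [pvLoopPos, dif_neg (by omega), if_neg (by omega)]

-- ===== VERDICT (by name: the statement is the Claim_ definition above) =====
theorem closestNum_spec : Claim_equal_closestNum := by
  intro values _ hpre
  obtain ⟨_, hv1, _⟩ := hpre
  unfold Spec_closestNum closestNum closestNum_alt
  set v0 := PySem.List.pyGetD values 0 0 with hv0def
  set v1 := PySem.List.pyGetD values 1 0 with hv1def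
  have hm : (0 : Int) < (v1.natAbs : Int) := by
    have := Int.natAbs_pos.mpr hv1; exact_mod_cast this
  have hmodlt := PySem.Int.mod_lt (v0 - 1) hm
  have hmodnn := PySem.Int.mod_nonneg (v0 - 1) hm
  by_cases hneg : v0 < 0
  · simp only [if_pos hneg]
    rw [pvLoopNeg_eq (v1.natAbs + 1) v1 (v0 - 1) hv1 (by omega)]
  · simp only [if_neg hneg]
    rw [pvLoopPos_eq v1 hv1 (v0 - 1).toNat (v0 - 1) (le_refl _)]
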